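-- pv_equiv track=rewrite | github.com/lehuutrung1412/CS112.L21.KHTN | Assignments/Week_1/tao_bien.py | matrixFibonacci
-- ===== SOURCE A (Python) =====
-- def matMul(a,b):
--     c = [[0,0],[0,0]]
--     c[0][0] = a[0][0] * b[0][0] + a[0][1] * b[1][0]
--     c[0][1] = a[0][0] * b[0][1] + a[0][1] * b[1][1]
--     c[1][0] = a[1][0] * b[0][0] + a[1][1] * b[1][0]
--     c[1][1] = a[1][0] * b[0][1] + a[1][1] * b[1][1]
--     return c
--
-- def matrixFibonacci(n):
--   a = [[1,1],[1,0]]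
--   if (n == 1):
--     return a
--   if (n % 2 == 0):
--     return matMul(matrixFibonacci(n // 2), matrixFibonacci(n // 2))
--   else:
--     return matMul(matMul(matrixFibonacci(n // 2), matrixFibonacci(n // 2)),a)
-- ===== SOURCE B (Python) =====
-- def matMul(a, b):
--     return [[a[0][0]*b[0][0] + a[0][1]*b[1][0], a[0][0]*b[0][1] + a[0][1]*b[1][1]],
--             [a[1][0]*b[0][0] + a[1][1]*b[1][0], a[1][0]*b[0][1] + a[1][1]*b[1][1]]]
--
-- def matrixFibonacci(n):
--     # iterative binary exponentiation of [[1,1],[1,0]]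
--     result = [[1, 0], [0, 1]]
--     base = [[1, 1], [1, 0]]
--     while n > 0:
--         if n % 2 == 1:
--             result = matMul(result, base)
--         base = matMul(base, base)
--         n //= 2
--     return result
-- ===== Notes on version B (the rewrite author's own statement) =====
-- stated objective: faster
-- what changed: A is a recursive halving power that calls itself twice on n//2 (so it makes O(n) recursive calls); B is an iterative binary-exponentiation loop that squares the base once per bit, doing O(log n) matrix multiplications.
import Mathlib
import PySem

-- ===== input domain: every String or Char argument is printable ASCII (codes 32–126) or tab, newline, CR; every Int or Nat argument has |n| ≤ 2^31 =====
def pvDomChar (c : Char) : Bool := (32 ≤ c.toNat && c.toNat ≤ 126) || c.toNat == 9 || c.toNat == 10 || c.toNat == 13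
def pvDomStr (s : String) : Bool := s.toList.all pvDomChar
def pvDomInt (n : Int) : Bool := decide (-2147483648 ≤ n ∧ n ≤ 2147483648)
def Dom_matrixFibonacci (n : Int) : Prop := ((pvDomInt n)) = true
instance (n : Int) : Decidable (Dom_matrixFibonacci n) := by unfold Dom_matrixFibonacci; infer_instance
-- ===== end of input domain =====

-- B replaces A's doubly-recursive halving (two identical recursive calls per level, O(n) calls)
-- by an iterative binary-exponentiation loop (O(log n) matrix multiplications); same return value for n ≥ 1.


-- ===== PORT A =====
-- matMul: exact port of the 2×2 product; every matrix either program builds is a 2-list of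
-- 2-lists, so the catch-all (Python would raise IndexError) is never reached.
def matMul (a b : List (List Int)) : List (List Int) :=
  match a, b with
  | [[a00, a01], [a10, a11]], [[b00, b01], [b10, b11]] =>
      [[a00 * b00 + a01 * b10, a00 * b01 + a01 * b11],
       [a10 * b00 + a11 * b10, a10 * b01 + a11 * b11]]
  | _, _ => []

-- For n ≤ 0 the Python A recurses forever (RecursionError); the `n < 1` guard only makes the
-- port total there — those inputs are excluded by Pre_matrixFibonacci.
def matrixFibonacci (n : Int) : List (List Int) :=
  if n = 1 then [[1, 1], [1, 0]]
  else if n < 1 then [[1, 1], [1, 0]]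
  else if PySem.Int.mod n 2 = 0 then
    matMul (matrixFibonacci (PySem.Int.floordiv n 2)) (matrixFibonacci (PySem.Int.floordiv n 2))
  else
    matMul (matMul (matrixFibonacci (PySem.Int.floordiv n 2)) (matrixFibonacci (PySem.Int.floordiv n 2)))
      [[1, 1], [1, 0]]
termination_by n.toNat
decreasing_by
  all_goals
    have h2 : PySem.Int.floordiv n 2 = n / 2 := PySem.Int.floordiv_eq_ediv_of_pos (by omega)
    omega

-- ===== PORT B =====
-- the while-loop of Source B: result/base are the loop state
def fibLoop (n : Int) (result base : List (List Int)) : List (List Int) :=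
  if 0 < n then
    fibLoop (PySem.Int.floordiv n 2)
      (if PySem.Int.mod n 2 = 1 then matMul result base else result)
      (matMul base base)
  else result
termination_by n.toNat
decreasing_by
  have h2 : PySem.Int.floordiv n 2 = n / 2 := PySem.Int.floordiv_eq_ediv_of_pos (by omega)
  omega

def matrixFibonacci_alt (n : Int) : List (List Int) :=
  fibLoop n [[1, 0], [0, 1]] [[1, 1], [1, 0]]

-- ===== PRECONDITION & SPEC =====
-- A recurses forever (RecursionError) for every n ≤ 0, so only n ≥ 1 is claimed.
def Pre_matrixFibonacci (n : Int) : Prop := 1 ≤ n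
instance (n : Int) : Decidable (Pre_matrixFibonacci n) := by unfold Pre_matrixFibonacci; infer_instance
def pvWitness_matrixFibonacci : Int := 5

def Spec_matrixFibonacci (n : Int) (out : List (List Int)) : Prop := out = matrixFibonacci_alt n
instance (n : Int) (out : List (List Int)) : Decidable (Spec_matrixFibonacci n out) := by unfold Spec_matrixFibonacci; infer_instance

-- ===== CLAIM (what is proved, stated in full; the proofs are below) =====
def Claim_equal_matrixFibonacci : Prop := ∀ (n : Int), Dom_matrixFibonacci n → Pre_matrixFibonacci n → Spec_matrixFibonacci n (matrixFibonacci n)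

-- ===== LEMMAS AND PROOFS =====
-- Abstraction: every matrix in play is [[a,b],[c,d]]; reason on quadruples.
def qmul (x y : Int × Int × Int × Int) : Int × Int × Int × Int :=
  match x, y with
  | (a, b, c, d), (e, f, g, h) => (a*e + b*g, a*f + b*h, c*e + d*g, c*f + d*h)

def qid : Int × Int × Int × Int := (1, 0, 0, 1)
def qM : Int × Int × Int × Int := (1, 1, 1, 0)

def qpow (b : Int × Int × Int × Int) : Nat → Int × Int × Int × Int
  | 0 => qid
  | k + 1 => qmul (qpow b k) b

def mk4 : Int × Int × Int × Int → List (List Int)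
  | (a, b, c, d) => [[a, b], [c, d]]

theorem matMul_mk4 (x y : Int × Int × Int × Int) : matMul (mk4 x) (mk4 y) = mk4 (qmul x y) := by
  obtain ⟨a, b, c, d⟩ := x; obtain ⟨e, f, g, h⟩ := y; rfl

theorem qmul_assoc (x y z : Int × Int × Int × Int) : qmul (qmul x y) z = qmul x (qmul y z) := by
  obtain ⟨a, b, c, d⟩ := x; obtain ⟨e, f, g, h⟩ := y; obtain ⟨i, j, k, l⟩ := z
  simp only [qmul, Prod.mk.injEq]
  refine ⟨by ring, by ring, by ring, by ring⟩

theorem qmul_id_left (x : Int × Int × Int × Int) : qmul qid x = x := by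
  obtain ⟨a, b, c, d⟩ := x
  simp only [qmul, qid, Prod.mk.injEq]
  refine ⟨by ring, by ring, by ring, by ring⟩

theorem qmul_id_right (x : Int × Int × Int × Int) : qmul x qid = x := by
  obtain ⟨a, b, c, d⟩ := x
  simp only [qmul, qid, Prod.mk.injEq]
  refine ⟨by ring, by ring, by ring, by ring⟩

theorem qpow_add (b : Int × Int × Int × Int) (m k : Nat) :
    qpow b (m + k) = qmul (qpow b m) (qpow b k) := by
  induction k with
  | zero => simp [qpow, qmul_id_right]
  | succ k ih =>
      show qpow b ((m + k) + 1) = qmul (qpow b m) (qpow b (k + 1))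
      simp only [qpow, ih, qmul_assoc]

theorem qpow_one (b : Int × Int × Int × Int) : qpow b 1 = b := by
  simp [qpow, qmul_id_left]

theorem qpow_sq (b : Int × Int × Int × Int) (k : Nat) :
    qpow (qmul b b) k = qpow b (2 * k) := by
  induction k with
  | zero => rfl
  | succ k ih =>
      have : 2 * (k + 1) = 2 * k + 1 + 1 := by omega
      rw [this]
      simp only [qpow, ih, qmul_assoc]

-- characterization of port A: it computes qM ^ n
theorem A_pow : ∀ (k : Nat) (n : Int), n.toNat ≤ k → 1 ≤ n →
    matrixFibonacci n = mk4 (qpow qM n.toNat) := by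
  intro k
  induction k with
  | zero => intro n hk h1; omega
  | succ k ih =>
      intro n hk h1
      rw [matrixFibonacci]
      by_cases h1' : n = 1
      · subst h1'; simp [qpow_one]; rfl
      · have h2 : 2 ≤ n := by omega
        have hfd : PySem.Int.floordiv n 2 = n / 2 := PySem.Int.floordiv_eq_ediv_of_pos (by omega)
        have hmd : PySem.Int.mod n 2 = n % 2 := PySem.Int.mod_eq_emod_of_pos (by omega)
        have hih : matrixFibonacci (PySem.Int.floordiv n 2)
            = mk4 (qpow qM (PySem.Int.floordiv n 2).toNat) := by
          apply ih <;> omega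
        by_cases hev : PySem.Int.mod n 2 = 0
        · have hn : n.toNat = (PySem.Int.floordiv n 2).toNat + (PySem.Int.floordiv n 2).toNat := by
            rw [hfd]; omega
          simp only [if_neg h1', if_neg (by omega : ¬ n < 1), if_pos hev, hih, matMul_mk4, hn,
            qpow_add]
        · have hn : n.toNat = ((PySem.Int.floordiv n 2).toNat + (PySem.Int.floordiv n 2).toNat) + 1 := by
            rw [hfd] at *; rw [hmd] at hev; omega
          simp only [if_neg h1', if_neg (by omega : ¬ n < 1), if_neg hev, hih,
            show ([[(1 : Int), 1], [1, 0]]) = mk4 qM from rfl, matMul_mk4, hn, qpow, qpow_add, qmul_id_left]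

-- loop invariant of port B: fibLoop n R B = R * B ^ n  (n ≤ 0 contributes B^0)
theorem B_loop : ∀ (k : Nat) (n : Int), n.toNat ≤ k → ∀ (x y : Int × Int × Int × Int),
    fibLoop n (mk4 x) (mk4 y) = mk4 (qmul x (qpow y n.toNat)) := by
  intro k
  induction k with
  | zero =>
      intro n hk x y
      rw [fibLoop]
      simp [show ¬ 0 < n from by omega, show n.toNat = 0 from by omega, qpow, qmul_id_right]
  | succ k ih =>
      intro n hk x y
      rw [fibLoop]
      by_cases hpos : 0 < n
      · have hfd : PySem.Int.floordiv n 2 = n / 2 := PySem.Int.floordiv_eq_ediv_of_pos (by omega)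
        have hmd : PySem.Int.mod n 2 = n % 2 := PySem.Int.mod_eq_emod_of_pos (by omega)
        have hk' : (PySem.Int.floordiv n 2).toNat ≤ k := by rw [hfd]; omega
        by_cases hodd : PySem.Int.mod n 2 = 1
        · have hn : n.toNat = 1 + 2 * (PySem.Int.floordiv n 2).toNat := by
            rw [hfd] at *; rw [hmd] at hodd; omega
          simp only [if_pos hpos, if_pos hodd, matMul_mk4, ih _ hk', qpow_sq, hn]
          rw [qpow_add, qpow_one, qmul_assoc]
        · have hn : n.toNat = 2 * (PySem.Int.floordiv n 2).toNat := by
            rw [hfd] at *; rw [hmd] at hodd; omega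
          simp only [if_pos hpos, if_neg hodd, matMul_mk4, ih _ hk', qpow_sq, hn]
      · simp [if_neg hpos, show n.toNat = 0 from by omega, qpow, qmul_id_right]

theorem B_pow (n : Int) : matrixFibonacci_alt n = mk4 (qpow qM n.toNat) := by
  have := B_loop n.toNat n (le_refl _) qid qM
  simpa [matrixFibonacci_alt, qmul_id_left] using this

-- ===== VERDICT (by name: the statement is the Claim_ definition above) =====
theorem matrixFibonacci_spec : Claim_equal_matrixFibonacci := by
  intro n _ hpre
  unfold Spec_matrixFibonacci
  rw [B_pow, A_pow n.toNat n (le_refl _) hpre]
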